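-- pv_equiv track=rewrite | github.com/yangchoi/algorithm-again | book/develop_feature.py | solution
-- ===== SOURCE A (Python) =====
-- import math
-- from collections import deque
--
-- def solution(progresses, speeds):
--     answer = []
--     # 일단 각 task 들이 며칠 후에 끝날지는 구할 수 있을 것 같다
--     # 첫번째 93은 100까지 7이 남았고 speeds는 1이니까 7일
--     # 두번째 30은 100까지 70이 남았고 speeds는 30이니까 math.ceil(70/30) 하면 3일
--     # 세번째 55는 100까지 45가 남았고 speeds는 5니까 match.ceil(45/5) 하면 9일
--
--     # 여기서 첫번째 작업은 7일이고, 이것보다 작은 값은 3밖에 없으니 함께 2가 되고 남은 하나는 본인과 같거나 큰 것이 없으니 1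
--     days = deque([])
--     for idx, p in enumerate(progresses):
--         result = (100 - p) / speeds[idx]
--         days.append(math.ceil(result))
--
--     # days가 존재할 때까지 계속한다
--     # 우선 days[i] 는 popleft 를 하고
--     # days를 돌면서 days[i] 보다 작거나 같은 것을 찾는다
--     # 찾으면 +1, 못찾으면 0
--
--     while days:
--         current_day = days.popleft()
--         count = 1
--
--         while days and current_day >= days[0]:
--             days.popleft()
--             count += 1
--
--         answer.append(count)
--
--     return answer
-- ===== SOURCE B (Python) =====
-- import math
--
-- def solution(progresses, speeds):
--     days = [math.ceil((100 - p) / s) for p, s in zip(progresses, speeds)]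
--     leaders = []
--     best = None
--     for i, d in enumerate(days):
--         if best is None or d > best:
--             leaders.append(i)
--             best = d
--     gaps = [b - a for a, b in zip(leaders, leaders[1:])]
--     if leaders:
--         gaps.append(len(days) - leaders[-1])
--     return gaps
-- ===== Notes on version B (the rewrite author's own statement) =====
-- stated objective: simpler
-- what changed: Replaces A's deque with a destructive popleft-outer/popleft-inner block-consumption loop by a two-pass form: one pass collecting the indices where the completion day is a new strict running maximum (block leaders), then the answer as differences of consecutive leader indices plus the tail length.
import Mathlib
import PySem

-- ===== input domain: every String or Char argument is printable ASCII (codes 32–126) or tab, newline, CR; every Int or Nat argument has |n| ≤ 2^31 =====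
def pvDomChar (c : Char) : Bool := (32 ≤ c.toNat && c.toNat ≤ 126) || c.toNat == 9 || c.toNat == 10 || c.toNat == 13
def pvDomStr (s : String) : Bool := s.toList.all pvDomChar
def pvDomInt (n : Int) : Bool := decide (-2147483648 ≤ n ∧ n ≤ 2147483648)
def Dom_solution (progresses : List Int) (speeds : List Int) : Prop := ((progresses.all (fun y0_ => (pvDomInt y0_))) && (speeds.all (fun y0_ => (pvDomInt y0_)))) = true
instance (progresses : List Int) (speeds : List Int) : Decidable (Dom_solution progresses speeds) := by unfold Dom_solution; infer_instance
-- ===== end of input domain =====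

-- B replaces A's deque/popleft block consumption by a two-pass form (strict running-max
-- leader indices, then index gaps); objective: simpler. Equal return values on Pre_.

-- ===== PORT A =====
-- math.ceil((100 - p) / s): on Dom (|100 - p| ≤ 2^31 + 100 < 2^53) the float ceiling is
-- exact, so it is ported as exact ceiling division ceil(a/s) = -((-a) // s).
def pyCeilRatio (a s : Int) : Int := -(PySem.Int.floordiv (-a) s)

-- inner while loop: pop elements while current_day >= days[0]; returns (#popped, rest)
def solnDropWhileLe (cur : Int) : List Int → Nat × List Int
  | [] => (0, [])
  | d :: rest =>
    if cur ≥ d then ((solnDropWhileLe cur rest).1 + 1, (solnDropWhileLe cur rest).2)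
    else (0, d :: rest)

lemma solnDropWhileLe_len (cur : Int) (l : List Int) :
    (solnDropWhileLe cur l).1 + (solnDropWhileLe cur l).2.length = l.length := by
  induction l with
  | nil => simp [solnDropWhileLe]
  | cons d rest ih =>
    by_cases h : cur ≥ d
    · simp [solnDropWhileLe, h]; omega
    · simp [solnDropWhileLe, h]

-- outer while loop over the deque
def solnConsume : List Int → List Int
  | [] => []
  | d :: rest =>
    (1 + ((solnDropWhileLe d rest).1 : Int)) :: solnConsume (solnDropWhileLe d rest).2
  termination_by l => l.length
  decreasing_by
    have := solnDropWhileLe_len d rest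
    simp; omega

def solution (progresses : List Int) (speeds : List Int) : List Int :=
  let days := (PySem.List.enumerate progresses).map
    (fun ip => pyCeilRatio (100 - ip.2) ((PySem.List.pyGet? speeds ip.1).getD 0))
  solnConsume days

-- ===== PORT B =====
-- pass 1: indices whose day is a new strict running maximum
def altLeaders : List (Int × Int) → Option Int → List Int
  | [], _ => []
  | (i, d) :: rest, best =>
    match best with
    | none => i :: altLeaders rest (some d)
    | some b => if d > b then i :: altLeaders rest (some d) else altLeaders rest (some b)

def solution_alt (progresses : List Int) (speeds : List Int) : List Int :=
  let days := (List.zip progresses speeds).map (fun ps => pyCeilRatio (100 - ps.1) ps.2)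
  let leaders := altLeaders (PySem.List.enumerate days) none
  let gaps := (List.zip leaders leaders.tail).map (fun ab => ab.2 - ab.1)
  match leaders.getLast? with
  | some l => gaps ++ [(days.length : Int) - l]
  | none => gaps

-- ===== PRECONDITION & SPEC =====
-- Pre_ excludes exactly the inputs where Python A raises: a missing speed (IndexError
-- when speeds is shorter than progresses) or a zero divisor among the used speeds.
def Pre_solution (progresses : List Int) (speeds : List Int) : Prop :=
  progresses.length ≤ speeds.length ∧ ∀ s ∈ speeds.take progresses.length, s ≠ 0
instance (progresses : List Int) (speeds : List Int) : Decidable (Pre_solution progresses speeds) := by unfold Pre_solution; infer_instance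
def pvWitness_solution : List Int × List Int := ([93, 30, 55], [1, 30, 5])

def Spec_solution (progresses : List Int) (speeds : List Int) (out : List Int) : Prop := out = solution_alt progresses speeds
instance (progresses : List Int) (speeds : List Int) (out : List Int) : Decidable (Spec_solution progresses speeds out) := by unfold Spec_solution; infer_instance

-- ===== CLAIM (what is proved, stated in full; the proofs are below) =====
def Claim_equal_solution : Prop := ∀ (progresses : List Int) (speeds : List Int), Dom_solution progresses speeds → Pre_solution progresses speeds → Spec_solution progresses speeds (solution progresses speeds)

-- ===== LEMMAS AND PROOFS =====

-- B's gap computation, as a function of the leader list and the total length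
def gapsOf (ls : List Int) (n : Int) : List Int :=
  match ls.getLast? with
  | some l => (List.zip ls ls.tail).map (fun ab => ab.2 - ab.1) ++ [n - l]
  | none => (List.zip ls ls.tail).map (fun ab => ab.2 - ab.1)

lemma gapsOf_cons (s x : Int) (t : List Int) (n : Int) :
    gapsOf (s :: x :: t) n = (x - s) :: gapsOf (x :: t) n := by
  rcases h : (x :: t).getLast? with _ | l
  · simp at h
  · simp [gapsOf, h]

lemma solnDropWhileLe_head (cur : Int) (l : List Int) (d' : Int) (t : List Int)
    (h : (solnDropWhileLe cur l).2 = d' :: t) : cur < d' := by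
  induction l with
  | nil => simp [solnDropWhileLe] at h
  | cons d rest ih =>
    by_cases hc : cur ≥ d
    · simp [solnDropWhileLe, hc] at h; exact ih h
    · simp [solnDropWhileLe, hc] at h; omega

lemma altLeaders_skip (cur : Int) (l : List Int) : ∀ s : Int,
    altLeaders (PySem.List.enumerate l s) (some cur) =
      altLeaders (PySem.List.enumerate (solnDropWhileLe cur l).2
        (s + ((solnDropWhileLe cur l).1 : Int))) (some cur) := by
  induction l with
  | nil => simp [solnDropWhileLe]
  | cons d rest ih =>
    intro s
    by_cases hc : cur ≥ d
    · have hnd : ¬ d > cur := by omega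
      simp only [solnDropWhileLe, hc, if_true, PySem.List.enumerate_cons, altLeaders, hnd,
        if_false]
      rw [ih (s + 1)]
      congr 2
      push_cast
      ring
    · simp [solnDropWhileLe, hc]

lemma consume_eq_gaps : ∀ (n : Nat) (days : List Int), days.length ≤ n → ∀ s : Int,
    solnConsume days =
      gapsOf (altLeaders (PySem.List.enumerate days s) none) (s + (days.length : Int)) := by
  intro n
  induction n with
  | zero =>
    intro days h s
    have : days = [] := by cases days <;> simp_all
    subst this
    simp [solnConsume, gapsOf, altLeaders, PySem.List.enumerate]
  | succ n ih =>
    intro days h s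
    cases days with
    | nil => simp [solnConsume, gapsOf, altLeaders, PySem.List.enumerate]
    | cons d rest =>
      have hlen := solnDropWhileLe_len d rest
      rw [solnConsume]
      rw [PySem.List.enumerate_cons]
      simp only [altLeaders]
      rw [altLeaders_skip d rest (s + 1)]
      rcases hr : (solnDropWhileLe d rest).2 with _ | ⟨d', t⟩
      · -- everything absorbed into the first block
        rw [hr] at hlen
        simp only [PySem.List.enumerate_nil, altLeaders, solnConsume]
        simp [gapsOf]
        simp at hlen
        omega
      · -- next block starts at d' > d, the next leader
        have hd' : d' > d := solnDropWhileLe_head d rest d' t hr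
        rw [hr] at hlen
        rw [PySem.List.enumerate_cons]
        simp only [altLeaders, hd', if_true]
        rw [gapsOf_cons]
        have hrec := ih (d' :: t) (by simp at h hlen ⊢; omega)
          (s + 1 + ((solnDropWhileLe d rest).1 : Int))
        rw [PySem.List.enumerate_cons] at hrec
        simp only [altLeaders] at hrec
        congr 1
        · omega
        · rw [hrec]
          congr 1
          simp at hlen ⊢
          omega

lemma days_eq (progresses speeds : List Int)
    (hlen : progresses.length ≤ speeds.length) :
    (PySem.List.enumerate progresses).map
      (fun ip => pyCeilRatio (100 - ip.2) ((PySem.List.pyGet? speeds ip.1).getD 0)) =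
    (List.zip progresses speeds).map (fun ps => pyCeilRatio (100 - ps.1) ps.2) := by
  apply List.ext_getElem
  · simp [PySem.List.length_enumerate]
    omega
  · intro k h1 h2
    have hk : k < progresses.length := by
      simpa [PySem.List.length_enumerate] using h1
    have hks : k < speeds.length := lt_of_lt_of_le hk hlen
    simp [PySem.List.getElem_enumerate, List.getElem_zip, hks]

-- ===== VERDICT (by name: the statement is the Claim_ definition above) =====
theorem solution_spec : Claim_equal_solution := by
  intro progresses speeds _ hpre
  unfold Spec_solution solution solution_alt
  rw [days_eq progresses speeds hpre.1]
  rw [consume_eq_gaps _ _ (le_refl _) 0, zero_add]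
  rfl
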